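-- pv_equiv track=rewrite | github.com/IvanLaraR/Logica_ | 59_Inducción_Gramatical.py | induccion_gramatical
-- ===== SOURCE A (Python) =====
-- def induccion_gramatical(frases):
--     reglas_gramaticales = {}
--
--     # Recorrer cada frase
--     for frase in frases:
--         # Dividir la frase en palabras
--         palabras = frase.split()
--
--         # Tomar la primera palabra como el sujeto
--         sujeto = palabras[0]
--
--         # Tomar las palabras restantes como el predicado
--         predicado = " ".join(palabras[1:])
--
--         # Agregar la regla gramatical al diccionario
--         if sujeto in reglas_gramaticales:
--             reglas_gramaticales[sujeto].append(predicado)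
--         else:
--             reglas_gramaticales[sujeto] = [predicado]
--
--     return reglas_gramaticales
-- ===== SOURCE B (Python) =====
-- def induccion_gramatical(frases):
--     # Two-pass: split everything once, dedup the subjects in first-seen order,
--     # then build each entry with one filtered scan per subject.
--     parts = [frase.split() for frase in frases]
--     sujetos = list(dict.fromkeys(p[0] for p in parts))
--     return {s: [" ".join(p[1:]) for p in parts if p[0] == s] for s in sujetos}
-- ===== Notes on version B (the rewrite author's own statement) =====
-- stated objective: alternative
-- what changed: B replaces A's single pass maintaining a dict with append-or-create branching by a split-once / dedup-subjects / per-subject filtered comprehension pipeline (a dict comprehension over the distinct subjects).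
import Mathlib
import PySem

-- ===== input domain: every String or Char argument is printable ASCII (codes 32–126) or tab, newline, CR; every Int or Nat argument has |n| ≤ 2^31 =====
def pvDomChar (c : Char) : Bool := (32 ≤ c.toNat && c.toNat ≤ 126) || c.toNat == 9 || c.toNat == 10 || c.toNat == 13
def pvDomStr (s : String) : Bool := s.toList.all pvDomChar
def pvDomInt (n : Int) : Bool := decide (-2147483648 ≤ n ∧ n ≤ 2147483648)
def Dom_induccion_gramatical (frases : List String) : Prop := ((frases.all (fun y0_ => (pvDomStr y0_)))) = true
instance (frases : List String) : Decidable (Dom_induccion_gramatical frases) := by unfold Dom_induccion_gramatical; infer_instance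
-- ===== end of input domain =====

-- B groups by a split-once / dedup-subjects / per-subject filtered-scan pipeline instead of A's
-- single dict-building pass (alternative decomposition, same return value; no speed claim).

-- ===== PORT A =====
-- one pass; dict with append-or-create branching.
-- 'palabras[0]' raises IndexError when the split is empty; those inputs are outside Pre_ below,
-- the port uses pyGetD with a dummy default there.
def induccion_gramatical (frases : List String) : List (String × List String) :=
  (frases.foldl (fun (d : PySem.Dict String (List String)) frase =>
      let palabras := PySem.Str.split₀ frase
      let sujeto := PySem.List.pyGetD palabras 0 ""
      let predicado := PySem.Str.join " " (PySem.List.slice palabras (some 1) none)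
      if d.contains sujeto then d.insert sujeto (d.getD sujeto [] ++ [predicado])
      else d.insert sujeto [predicado])
    PySem.Dict.empty).items

-- ===== PORT B =====
-- split everything once, dedup the subjects in first-seen order, one filtered scan per subject.
-- (p[0] likewise raises on an empty split — outside Pre_; ported with pyGetD and a dummy default.)
def induccion_gramatical_alt (frases : List String) : List (String × List String) :=
  let parts := frases.map PySem.Str.split₀
  let sujetos := PySem.List.dedup (parts.map (fun p => PySem.List.pyGetD p 0 ""))
  sujetos.map (fun s =>
    (s, (parts.filter (fun p => PySem.List.pyGetD p 0 "" == s)).map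
        (fun p => PySem.Str.join " " (PySem.List.slice p (some 1) none))))

-- ===== PRECONDITION & SPEC =====
-- Pre_ excludes exactly the inputs containing a phrase with no words (empty/whitespace-only),
-- where Python A (and B) raise IndexError on palabras[0].
def Pre_induccion_gramatical (frases : List String) : Prop :=
  ∀ f ∈ frases, PySem.Str.split₀ f ≠ []
instance (frases : List String) : Decidable (Pre_induccion_gramatical frases) := by
  unfold Pre_induccion_gramatical; infer_instance

def pvWitness_induccion_gramatical : List String :=
  ["el gato corre", "el perro ladra", "maria canta", "el raton"]

def Spec_induccion_gramatical (frases : List String) (out : List (String × List String)) : Prop :=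
  out = induccion_gramatical_alt frases
instance (frases : List String) (out : List (String × List String)) :
    Decidable (Spec_induccion_gramatical frases out) := by
  unfold Spec_induccion_gramatical; infer_instance

-- ===== CLAIM (what is proved, stated in full; the proofs are below) =====
def Claim_equal_induccion_gramatical : Prop :=
  ∀ (frases : List String), Dom_induccion_gramatical frases →
    Pre_induccion_gramatical frases →
    Spec_induccion_gramatical frases (induccion_gramatical frases)

-- ===== LEMMAS AND PROOFS =====

-- subject / predicate of an already-split phrase
def pvKey (p : List String) : String := PySem.List.pyGetD p 0 ""
def pvPred (p : List String) : String := PySem.Str.join " " (PySem.List.slice p (some 1) none)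

-- A's append-or-create branch is exactly a 'modify'
theorem pv_stepA (d : PySem.Dict String (List String)) (s v : String) :
    (if d.contains s then d.insert s (d.getD s [] ++ [v]) else d.insert s [v])
      = d.modify s [] (· ++ [v]) := by
  by_cases h : d.contains s = true
  · simp [PySem.Dict.modify, h]
  · simp only [Bool.not_eq_true] at h
    simp [PySem.Dict.modify, h, PySem.Dict.getD_of_not_contains]

theorem induccion_gramatical_eq_alt (frases : List String) :
    induccion_gramatical frases = induccion_gramatical_alt frases := by
  unfold induccion_gramatical induccion_gramatical_alt
  simp only
  -- rewrite A's fold into a fold over key/pred pairs of the split phrases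
  have hfold :
      frases.foldl (fun (d : PySem.Dict String (List String)) frase =>
        let palabras := PySem.Str.split₀ frase
        let sujeto := PySem.List.pyGetD palabras 0 ""
        let predicado := PySem.Str.join " " (PySem.List.slice palabras (some 1) none)
        if d.contains sujeto then d.insert sujeto (d.getD sujeto [] ++ [predicado])
        else d.insert sujeto [predicado]) PySem.Dict.empty
      = ((frases.map PySem.Str.split₀).map (fun p => (pvKey p, pvPred p))).foldl
          (fun d q => d.modify q.1 [] (· ++ [q.2])) PySem.Dict.empty := by
    rw [List.foldl_map, List.foldl_map]
    apply PySem.List.foldl_congr_mem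
    intro d f _
    simpa [pvKey, pvPred] using pv_stepA d (pvKey (PySem.Str.split₀ f)) (pvPred (PySem.Str.split₀ f))
  rw [hfold]
  set parts := frases.map PySem.Str.split₀ with hparts
  set pairs := parts.map (fun p => (pvKey p, pvPred p)) with hpairs
  set D := pairs.foldl (fun d q => d.modify q.1 [] (· ++ [q.2])) PySem.Dict.empty with hD
  have hnodup : D.keys.Nodup := by
    rw [hD]
    exact PySem.Dict.nodup_keys_foldl_modify_key pairs Prod.fst []
      (fun _ q => (· ++ [q.2])) PySem.Dict.empty PySem.Dict.nodup_keys_empty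
  have hkeys : D.keys = PySem.List.dedup (parts.map pvKey) := by
    rw [hD]
    rw [PySem.Dict.keys_foldl_modify_key]
    simp [hpairs, PySem.Set.update_nil_left, PySem.Dict.keys_empty, List.map_map,
      Function.comp_def]
  have hgetD : ∀ k, D.getD k [] = (pairs.filter (fun q => q.1 == k)).map (·.2) := by
    intro k
    rw [hD, PySem.Dict.getD_foldl_modify_append]
    simp [PySem.Dict.getD_empty]
  rw [PySem.Dict.items_eq_map_keys D hnodup [], hkeys]
  apply List.map_congr_left
  intro s _
  refine Prod.ext rfl ?_
  rw [hgetD s, hpairs, List.filter_map, List.map_map]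
  simp [Function.comp_def, pvKey, pvPred]

-- ===== VERDICT (by name: the statement is the Claim_ definition above) =====
theorem induccion_gramatical_spec : Claim_equal_induccion_gramatical := by
  intro frases _ _
  unfold Spec_induccion_gramatical
  exact induccion_gramatical_eq_alt frases
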